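-- pv_equiv track=rewrite | github.com/p-ploi/nominee_account_with_lstm2017 | src/util.py | sequence_summarize
-- ===== SOURCE A (Python) =====
-- def sequence_summarize(sorted_transactions):
--     out = []
--     temp = [0, 0, 0]
--     for t in sorted_transactions:
--         if t[1] == temp[1] and t[2] == temp[2]:
--             temp[0] = temp[0] + t[0]
--         else:
--             out.append(temp)
--             temp = [t[0], t[1], t[2]]
--     out.append(temp)
--     return out[1:]
-- ===== SOURCE B (Python) =====
-- def sequence_summarize(sorted_transactions):
--     # Two stages: first partition the list into maximal runs of rows sharing the
--     # (t[1], t[2]) key, then summarize each run as [sum of amounts, key1, key2].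
--     runs = []
--     for t in sorted_transactions:
--         if runs and runs[-1][0][1] == t[1] and runs[-1][0][2] == t[2]:
--             runs[-1].append(t)
--         else:
--             runs.append([t])
--     return [[sum(t[0] for t in g), g[0][1], g[0][2]] for g in runs]
-- ===== Notes on version B (the rewrite author's own statement) =====
-- stated objective: alternative
-- what changed: Replaces A's single-pass running-accumulator merge (seed temp=[0,0,0], emitted on key change, out[1:]) by a two-stage pipeline that first partitions the list into maximal runs of rows sharing (t[1],t[2]) and then maps each run to [sum of amounts, key1, key2]; Pre_ excludes rows shorter than 3 entries (both raise IndexError) and inputs whose first row has key (0,0), a corner where that key collides with A's seed accumulator so A merges the leading group into the dropped seed row while B summarizes it normally.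
-- outside the precondition, e.g. on sequence_summarize([[5, 0, 0], [3, 1, 1]]): A returns [[3, 1, 1]], B returns [[5, 0, 0], [3, 1, 1]]
import Mathlib
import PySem

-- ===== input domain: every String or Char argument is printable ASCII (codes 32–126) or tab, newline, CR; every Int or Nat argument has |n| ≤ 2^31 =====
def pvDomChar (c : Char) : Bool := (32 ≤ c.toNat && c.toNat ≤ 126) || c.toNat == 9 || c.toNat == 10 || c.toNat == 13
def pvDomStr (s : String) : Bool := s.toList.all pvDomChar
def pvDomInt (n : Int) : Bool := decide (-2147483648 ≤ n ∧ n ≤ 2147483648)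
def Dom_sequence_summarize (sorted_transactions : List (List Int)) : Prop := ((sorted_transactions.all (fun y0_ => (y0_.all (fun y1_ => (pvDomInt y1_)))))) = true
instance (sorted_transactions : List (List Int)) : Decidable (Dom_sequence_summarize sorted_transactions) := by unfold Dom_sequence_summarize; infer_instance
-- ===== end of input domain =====

-- B replaces A's single-pass running-accumulator merge by a two-stage pipeline:
-- partition into maximal equal-key runs, then map each run to its summary row;
-- Pre_ below states exactly which inputs are excluded and why.


-- ===== PORT A =====
-- loop body of A: state is (out, temp); Pre_ guarantees every row has ≥ 3 entries,
-- so t[i] is List.getD i 0 (exact in range)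
def pvStepA (p : List (List Int) × List Int) (t : List Int) : List (List Int) × List Int :=
  if t.getD 1 0 = p.2.getD 1 0 ∧ t.getD 2 0 = p.2.getD 2 0 then
    (p.1, [p.2.getD 0 0 + t.getD 0 0, p.2.getD 1 0, p.2.getD 2 0])
  else
    (p.1 ++ [p.2], [t.getD 0 0, t.getD 1 0, t.getD 2 0])

def sequence_summarize (sorted_transactions : List (List Int)) : List (List Int) :=
  let p := sorted_transactions.foldl pvStepA ([], [0, 0, 0])
  (p.1 ++ [p.2]).drop 1

-- ===== PORT B =====
-- stage 1 loop body: runs[-1] is getLast?, in-place extension of runs[-1] is dropLast ++ [·];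
-- g[0] is getD 0 [] (exact: every run B builds is nonempty, and rows have ≥ 3 entries under Pre_)
def pvRunStep (runs : List (List (List Int))) (t : List Int) : List (List (List Int)) :=
  match runs.getLast? with
  | some g =>
    if (g.getD 0 []).getD 1 0 = t.getD 1 0 ∧ (g.getD 0 []).getD 2 0 = t.getD 2 0 then
      runs.dropLast ++ [g ++ [t]]
    else
      runs ++ [[t]]
  | none => [[t]]

-- stage 2: summary of one run
def pvSumm (g : List (List Int)) : List Int :=
  [(g.map (fun t => t.getD 0 0)).sum, (g.getD 0 []).getD 1 0, (g.getD 0 []).getD 2 0]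

def sequence_summarize_alt (sorted_transactions : List (List Int)) : List (List Int) :=
  (sorted_transactions.foldl pvRunStep []).map pvSumm

-- ===== PRECONDITION & SPEC =====
def pvLeadKeyZero : List (List Int) → Bool
  | [] => false
  | t :: _ => t[1]? == some 0 && t[2]? == some 0

-- Pre_ excludes (a) rows shorter than 3 entries, on which A raises IndexError (B raises too),
-- and (b) inputs whose first row has key fields (0,0): that key coincides with A's initial
-- accumulator [0,0,0], so A merges the whole leading group into the seed row that out[1:]
-- drops — a corner that is an artefact of A's seed value, on which B summarizes the group
-- normally instead of omitting it.
def Pre_sequence_summarize (sorted_transactions : List (List Int)) : Prop :=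
  (∀ t ∈ sorted_transactions, 3 ≤ t.length) ∧ pvLeadKeyZero sorted_transactions = false
instance (sorted_transactions : List (List Int)) : Decidable (Pre_sequence_summarize sorted_transactions) := by unfold Pre_sequence_summarize; infer_instance

def pvWitness_sequence_summarize : List (List Int) := [[3, 1, 2], [4, 1, 2], [9, 5, 6]]

def Spec_sequence_summarize (sorted_transactions : List (List Int)) (out : List (List Int)) : Prop := out = sequence_summarize_alt sorted_transactions
instance (sorted_transactions : List (List Int)) (out : List (List Int)) : Decidable (Spec_sequence_summarize sorted_transactions out) := by unfold Spec_sequence_summarize; infer_instance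

-- ===== CLAIM (what is proved, stated in full; the proofs are below) =====
def Claim_equal_sequence_summarize : Prop := ∀ (sorted_transactions : List (List Int)), Dom_sequence_summarize sorted_transactions → Pre_sequence_summarize sorted_transactions → Spec_sequence_summarize sorted_transactions (sequence_summarize sorted_transactions)

-- ===== LEMMAS AND PROOFS =====

-- reference for A: grouping with a pending accumulator [a, b, c]
def pvGrpL (a b c : Int) : List (List Int) → List (List Int)
  | [] => [[a, b, c]]
  | t :: ts =>
    if t.getD 1 0 = b ∧ t.getD 2 0 = c then pvGrpL (a + t.getD 0 0) b c ts
    else [a, b, c] :: pvGrpL (t.getD 0 0) (t.getD 1 0) (t.getD 2 0) ts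

lemma pvFoldA (ts : List (List Int)) : ∀ (out : List (List Int)) (a b c : Int),
    (ts.foldl pvStepA (out, [a, b, c])).1 ++ [(ts.foldl pvStepA (out, [a, b, c])).2]
      = out ++ pvGrpL a b c ts := by
  induction ts with
  | nil => intro out a b c; simp [pvGrpL]
  | cons t ts ih =>
    intro out a b c
    by_cases h : t.getD 1 0 = b ∧ t.getD 2 0 = c
    · have hs : pvStepA (out, [a, b, c]) t = (out, [a + t.getD 0 0, b, c]) := by
        simp only [pvStepA, List.getD_cons_succ, List.getD_cons_zero]
        rw [if_pos h]
      simp only [List.foldl_cons, hs, ih, pvGrpL, if_pos h]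
    · have hs : pvStepA (out, [a, b, c]) t
          = (out ++ [[a, b, c]], [t.getD 0 0, t.getD 1 0, t.getD 2 0]) := by
        simp only [pvStepA, List.getD_cons_succ, List.getD_cons_zero]
        rw [if_neg h]
      simp only [List.foldl_cons, hs, ih, pvGrpL, if_neg h, List.append_assoc,
        List.singleton_append]

lemma pvA_eq (ts : List (List Int)) :
    sequence_summarize ts = (pvGrpL 0 0 0 ts).drop 1 := by
  have := pvFoldA ts [] 0 0 0
  simp only [List.nil_append] at this
  simp [sequence_summarize, this]

-- head-operating counterpart of pvRunStep, used via the reverse bridge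
def pvStepF (acc : List (List (List Int))) (t : List Int) : List (List (List Int)) :=
  match acc with
  | [] => [[t]]
  | g :: gs =>
    if (g.getD 0 []).getD 1 0 = t.getD 1 0 ∧ (g.getD 0 []).getD 2 0 = t.getD 2 0 then
      (g ++ [t]) :: gs
    else
      [t] :: g :: gs

lemma pvRunStep_eq (runs : List (List (List Int))) (t : List Int) :
    pvRunStep runs t = (pvStepF runs.reverse t).reverse := by
  rcases e : runs.reverse with _ | ⟨g, gs⟩
  · have : runs = [] := by simpa using congrArg List.reverse e
    subst this; rfl
  · have hr : runs = gs.reverse ++ [g] := by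
      have := congrArg List.reverse e; simpa using this
    subst hr
    simp only [pvRunStep, pvStepF, List.getLast?_concat, List.dropLast_concat]
    split_ifs <;> simp

lemma pvFoldBridge (l : List (List Int)) : ∀ runs : List (List (List Int)),
    l.foldl pvRunStep runs = (l.foldl pvStepF runs.reverse).reverse := by
  induction l with
  | nil => intro runs; simp
  | cons t l ih =>
    intro runs
    simp only [List.foldl_cons, ih, pvRunStep_eq, List.reverse_reverse]

lemma pvMain (ts : List (List Int)) :
    ∀ (rs : List (List (List Int))) (r : List (List Int)) (t0 : List Int) (r' : List (List Int)),
    r = t0 :: r' →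
    ((ts.foldl pvStepF (r :: rs)).map pvSumm).reverse
      = ((rs.map pvSumm).reverse) ++
          pvGrpL ((r.map (fun t => t.getD 0 0)).sum) (t0.getD 1 0) (t0.getD 2 0) ts := by
  induction ts with
  | nil =>
    intro rs r t0 r' hr
    subst hr
    simp [pvGrpL, pvSumm]
  | cons t ts ih =>
    intro rs r t0 r' hr
    subst hr
    by_cases h : t.getD 1 0 = t0.getD 1 0 ∧ t.getD 2 0 = t0.getD 2 0
    · have hs : pvStepF ((t0 :: r') :: rs) t = ((t0 :: r' ++ [t]) :: rs) := by
        simp only [pvStepF, List.getD_cons_zero]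
        rw [if_pos ⟨h.1.symm, h.2.symm⟩]
      rw [List.foldl_cons, hs]
      simp only [List.cons_append]
      rw [ih rs (t0 :: (r' ++ [t])) t0 (r' ++ [t]) rfl]
      simp only [pvGrpL, if_pos h, List.map_append, List.sum_append, List.map_cons,
        List.map_nil, List.sum_cons, List.sum_nil, add_zero, add_assoc]
    · have hs : pvStepF ((t0 :: r') :: rs) t = ([t] :: (t0 :: r') :: rs) := by
        simp only [pvStepF, List.getD_cons_zero]
        rw [if_neg (fun hc => h ⟨hc.1.symm, hc.2.symm⟩)]
      rw [List.foldl_cons, hs, ih ((t0 :: r') :: rs) [t] t [] rfl]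
      simp only [pvGrpL]
      rw [if_neg h]
      simp [pvSumm]

lemma pvB_eq (t : List Int) (ts : List (List Int)) :
    sequence_summarize_alt (t :: ts)
      = pvGrpL (t.getD 0 0) (t.getD 1 0) (t.getD 2 0) ts := by
  show ((t :: ts).foldl pvRunStep []).map pvSumm = _
  rw [pvFoldBridge]
  have h1 : (t :: ts).foldl pvStepF ([] : List (List (List Int))).reverse
      = ts.foldl pvStepF [[t]] := by simp [pvStepF]
  rw [h1, List.map_reverse]
  have := pvMain ts [] [t] t [] rfl
  simpa using this

-- bridge between Pre_'s t[i]? view and the ports' getD view, for rows of length ≥ 3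
lemma pvKey (t : List Int) (ht : 3 ≤ t.length) :
    t[1]? = some (t.getD 1 0) ∧ t[2]? = some (t.getD 2 0) := by
  rcases t with _ | ⟨a, _ | ⟨b, _ | ⟨c, r⟩⟩⟩ <;> simp_all

-- ===== VERDICT (by name: the statement is the Claim_ definition above) =====
theorem sequence_summarize_spec : Claim_equal_sequence_summarize := by
  intro ts _ hP
  obtain ⟨hlen, hkey⟩ := hP
  show sequence_summarize ts = sequence_summarize_alt ts
  cases ts with
  | nil => rfl
  | cons t ts =>
    obtain ⟨k1, k2⟩ := pvKey t (hlen t (List.mem_cons_self))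
    have h : ¬ (t.getD 1 0 = 0 ∧ t.getD 2 0 = 0) := by
      intro hc
      have hz : pvLeadKeyZero (t :: ts) = true := by
        show (t[1]? == some 0 && t[2]? == some 0) = true
        rw [k1, hc.1, k2, hc.2]
        rfl
      exact Bool.false_ne_true (hkey ▸ hz)
    rw [pvA_eq, pvB_eq]
    simp only [pvGrpL, if_neg h, List.drop_succ_cons, List.drop_zero]
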